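-- pv_equiv track=rewrite | github.com/coppolaemilio/Stellar | stringmanipulation.py | StatementFound
-- ===== SOURCE A (Python) =====
-- def StatementFound(Text):
--     String = str(Text)
--     bln = False
--     for lastchar in String:
--         if lastchar !=" ":
--             if lastchar == ":":
--                 bln = True
--             else:
--                 bln = False
--     if bln == True:
--         return(4*" ")
--     else:
--         return("")
-- ===== SOURCE B (Python) =====
-- def StatementFound(Text):
--     # Reverse scan: decide from the first non-space character at the end.
--     for ch in reversed(str(Text)):
--         if ch != " ":
--             return 4 * " " if ch == ":" else ""
--     return ""
-- ===== Notes on version B (the rewrite author's own statement) =====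
-- stated objective: faster
-- what changed: Replaces the forward full-string scan that keeps updating a boolean flag by a reverse scan that stops at the first non-space character, so typical inputs are decided after inspecting only the tail.
import Mathlib
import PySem

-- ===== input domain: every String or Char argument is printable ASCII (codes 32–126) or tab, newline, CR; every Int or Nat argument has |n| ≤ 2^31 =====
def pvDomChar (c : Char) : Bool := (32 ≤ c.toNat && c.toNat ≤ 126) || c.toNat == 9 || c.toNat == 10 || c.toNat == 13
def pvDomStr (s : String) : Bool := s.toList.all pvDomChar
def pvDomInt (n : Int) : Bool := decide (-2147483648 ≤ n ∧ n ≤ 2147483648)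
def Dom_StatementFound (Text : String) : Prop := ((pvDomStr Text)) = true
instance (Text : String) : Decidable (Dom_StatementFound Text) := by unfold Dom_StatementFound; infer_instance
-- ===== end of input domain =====

-- B replaces A's forward scan-with-flag by a reverse scan stopping at the first non-space char; same return value everywhere.
-- ===== PORT A =====
def StatementFound (Text : String) : String :=
  let bln := Text.toList.foldl (fun b lastchar => if lastchar != ' ' then (lastchar == ':') else b) false
  if bln = true then String.mk (List.replicate 4 ' ') else ""

-- ===== PORT B =====
def StatementFound_altGo : List Char → String
  | [] => ""
  | ch :: rest => if ch != ' ' then (if ch == ':' then String.mk (List.replicate 4 ' ') else "") else StatementFound_altGo rest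

def StatementFound_alt (Text : String) : String :=
  StatementFound_altGo Text.toList.reverse

-- ===== PRECONDITION & SPEC =====
def Spec_StatementFound (Text : String) (out : String) : Prop := out = StatementFound_alt Text
instance (Text : String) (out : String) : Decidable (Spec_StatementFound Text out) := by unfold Spec_StatementFound; infer_instance

-- ===== CLAIM (what is proved, stated in full; the proofs are below) =====
def Claim_equal_StatementFound : Prop := ∀ (Text : String), Dom_StatementFound Text → Spec_StatementFound Text (StatementFound Text)

-- ===== LEMMAS AND PROOFS =====

-- ===== VERDICT (by name: the statement is the Claim_ definition above) =====
theorem pvMain (r : List Char) :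
    (if r.reverse.foldl (fun b c => if c != ' ' then (c == ':') else b) false = true
      then String.mk (List.replicate 4 ' ') else "") = StatementFound_altGo r := by
  induction r with
  | nil => simp [StatementFound_altGo]
  | cons c rest ih =>
    simp only [List.reverse_cons, List.foldl_append, List.foldl_cons, List.foldl_nil,
      StatementFound_altGo]
    by_cases h : c = ' '
    · simp [h, ← ih]
    · simp [h]

theorem StatementFound_spec : Claim_equal_StatementFound := by
  intro Text _
  show StatementFound Text = StatementFound_alt Text
  have := pvMain Text.toList.reverse
  simpa [StatementFound, StatementFound_alt] using this
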